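-- pv_equiv track=rewrite | github.com/Faisal-F-AlTaie/Alberta-Collegiate-Coding-Contest-24 | Topographic_Isolation.py | find_topographic_isolation
-- ===== SOURCE A (Python) =====
-- def find_topographic_isolation(n, heights):
--     result = [0] * n
--     left_higher = [float('inf')] * n
--     right_higher = [float('inf')] * n
--
--     stack = []
--
--     for i in range(n):
--         while stack and heights[stack[-1]] < heights[i]:
--             stack.pop()
--         if stack:
--             left_higher[i] = i - stack[-1]
--         stack.append(i)
--
--
--     stack = []
--     for i in range(n - 1, -1, -1):
--         while stack and heights[stack[-1]] < heights[i]: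
--             stack.pop()
--         if stack:
--             right_higher[i] = stack[-1] - i
--         stack.append(i)
--
--
--     for i in range(1, n - 1):
--         if heights[i] > heights[i - 1] and heights[i] > heights[i + 1]:
--             min_distance = min(left_higher[i], right_higher[i])
--             if min_distance == float('inf'):
--                 result[i] = -1
--             else:
--                 result[i] = min_distance
--
--
--     return result
-- ===== SOURCE B (Python) =====
-- def find_topographic_isolation(n, heights):
--     result = [0] * n
--     for i in range(1, n - 1):
--         if heights[i] > heights[i - 1] and heights[i] > heights[i + 1]:
--             left = next((i - j for j in range(i - 1, -1, -1) if heights[j] >= heights[i]), None)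
--             right = next((k - i for k in range(i + 1, n) if heights[k] >= heights[i]), None)
--             if left is None and right is None:
--                 result[i] = -1
--             elif left is None:
--                 result[i] = right
--             elif right is None:
--                 result[i] = left
--             else:
--                 result[i] = min(left, right)
--     return result
-- ===== Notes on version B (the rewrite author's own statement) =====
-- stated objective: simpler
-- what changed: Replaced the two monotonic-stack precomputation passes over all indices by a direct per-peak scan: for each local peak, walk left and right to the first index of height >= the peak and take the minimum distance (-1 if neither exists); non-peaks stay 0.
import Mathlib
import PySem

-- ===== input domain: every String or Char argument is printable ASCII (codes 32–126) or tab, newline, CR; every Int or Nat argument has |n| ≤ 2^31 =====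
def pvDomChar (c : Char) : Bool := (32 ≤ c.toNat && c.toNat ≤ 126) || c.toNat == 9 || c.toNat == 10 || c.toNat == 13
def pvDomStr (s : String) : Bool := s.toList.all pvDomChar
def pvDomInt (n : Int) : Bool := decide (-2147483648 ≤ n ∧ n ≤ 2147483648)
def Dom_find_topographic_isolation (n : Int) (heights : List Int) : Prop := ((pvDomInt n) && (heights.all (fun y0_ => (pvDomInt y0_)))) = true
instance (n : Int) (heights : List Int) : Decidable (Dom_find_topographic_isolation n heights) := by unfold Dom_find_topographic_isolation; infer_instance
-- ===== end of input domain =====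

-- B replaces A's two monotonic-stack precomputation passes by a direct per-peak left/right
-- scan for the nearest index of height >= the peak; same return value (objective: simpler).

-- ===== PORT A =====
-- the inner `while stack and heights[stack[-1]] < heights[i]: stack.pop()` loop (head = top)
def pvPop (heights : List Int) (h : Int) : List Nat → List Nat
  | [] => []
  | j :: rest => if heights.getD j 0 < h then pvPop heights h rest else j :: rest

-- first pass: `for i in range(n)` building left_higher (none = float('inf'), some d = distance)
def pvLeftAux (heights : List Int) (n : Nat) (i : Nat) (stack : List Nat)
    (acc : List (Option Nat)) : List (Option Nat) :=
  if _h : i < n then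
    let s := pvPop heights (heights.getD i 0) stack
    let v : Option Nat := s.head?.map (fun j => i - j)   -- `if stack: left_higher[i] = i - stack[-1]`
    pvLeftAux heights n (i + 1) (i :: s) (acc ++ [v])
  else acc
  termination_by n - i

-- second pass: `for i in range(n-1, -1, -1)` building right_higher (first argument is i+1)
def pvRightAux (heights : List Int) : Nat → List Nat → List (Option Nat) → List (Option Nat)
  | 0, _, acc => acc
  | i + 1, stack, acc =>
    let s := pvPop heights (heights.getD i 0) stack
    let v : Option Nat := s.head?.map (fun j => j - i)   -- `if stack: right_higher[i] = stack[-1] - i`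
    pvRightAux heights i (i :: s) (v :: acc)

def find_topographic_isolation (n : Int) (heights : List Int) : List Int :=
  let nn := n.toNat
  let lh := pvLeftAux heights nn 0 [] []
  let rh := pvRightAux heights nn [] []
  -- `result = [0]*n` with the `for i in range(1, n-1)` peak loop, written index-wise
  (List.range nn).map (fun i =>
    if 1 ≤ i ∧ i + 1 < nn ∧ heights.getD (i - 1) 0 < heights.getD i 0 ∧
        heights.getD (i + 1) 0 < heights.getD i 0 then
      match lh.getD i none, rh.getD i none with
      | none, none => -1                        -- min_distance == float('inf')
      | some a, none => (a : Int)
      | none, some b => (b : Int)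
      | some a, some b => ((min a b : Nat) : Int)
    else 0)

-- ===== PORT B =====
-- leftward scan: nearest j < i with heights[j] >= h
def pvScanL (heights : List Int) (h : Int) : Nat → Option Nat
  | 0 => none
  | j + 1 => if h ≤ heights.getD j 0 then some j else pvScanL heights h j

-- rightward scan: nearest k with start ≤ k < n and heights[k] >= h
def pvScanR (heights : List Int) (h : Int) (n : Nat) (k : Nat) : Option Nat :=
  if _hk : k < n then
    (if h ≤ heights.getD k 0 then some k else pvScanR heights h n (k + 1))
  else none
  termination_by n - k

def find_topographic_isolation_alt (n : Int) (heights : List Int) : List Int :=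
  let nn := n.toNat
  (List.range nn).map (fun i =>
    if 1 ≤ i ∧ i + 1 < nn ∧ heights.getD (i - 1) 0 < heights.getD i 0 ∧
        heights.getD (i + 1) 0 < heights.getD i 0 then
      match pvScanL heights (heights.getD i 0) i, pvScanR heights (heights.getD i 0) nn (i + 1) with
      | none, none => -1
      | some j, none => ((i - j : Nat) : Int)
      | none, some k => ((k - i : Nat) : Int)
      | some j, some k => ((min (i - j) (k - i) : Nat) : Int)
    else 0)

-- ===== PRECONDITION & SPEC =====
-- Pre_ excludes exactly the inputs where Python A raises IndexError: n > len(heights).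
def Pre_find_topographic_isolation (n : Int) (heights : List Int) : Prop :=
  n ≤ (heights.length : Int)
instance (n : Int) (heights : List Int) : Decidable (Pre_find_topographic_isolation n heights) := by
  unfold Pre_find_topographic_isolation; infer_instance

def pvWitness_find_topographic_isolation : Int × List Int := (5, [1, 5, 2, 4, 3])

def Spec_find_topographic_isolation (n : Int) (heights : List Int) (out : List Int) : Prop :=
  out = find_topographic_isolation_alt n heights
instance (n : Int) (heights : List Int) (out : List Int) :
    Decidable (Spec_find_topographic_isolation n heights out) := by
  unfold Spec_find_topographic_isolation; infer_instance

-- ===== CLAIM (what is proved, stated in full; the proofs are below) =====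
def Claim_equal_find_topographic_isolation : Prop := ∀ (n : Int) (heights : List Int), Dom_find_topographic_isolation n heights → Pre_find_topographic_isolation n heights → Spec_find_topographic_isolation n heights (find_topographic_isolation n heights)

-- ===== LEMMAS AND PROOFS =====

-- j is still on the left-pass stack just before index i is processed
def goodL (heights : List Int) (i j : Nat) : Bool :=
  decide (∀ m, m < i → j < m → heights.getD m 0 ≤ heights.getD j 0)

-- the left-pass stack just before index i is processed (head = top)
def gsL (heights : List Int) (i : Nat) : List Nat :=
  ((List.range i).filter (goodL heights i)).reverse

-- j is still on the right-pass stack just before index i-1 is processed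
def goodR (heights : List Int) (i j : Nat) : Bool :=
  decide (∀ m, m < j → i ≤ m → heights.getD m 0 ≤ heights.getD j 0)

def gsR (heights : List Int) (n i : Nat) : List Nat :=
  (List.range' i (n - i)).filter (goodR heights i)

def leftVal (heights : List Int) (i : Nat) : Option Nat :=
  (pvScanL heights (heights.getD i 0) i).map (fun j => i - j)

def rightVal (heights : List Int) (n i : Nat) : Option Nat :=
  (pvScanR heights (heights.getD i 0) n (i + 1)).map (fun k => k - i)

lemma pop_filter (heights : List Int) (h : Int) :
    ∀ (l : List Nat), l.Pairwise (fun a b => heights.getD a 0 ≤ heights.getD b 0) →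
      pvPop heights h l = l.filter (fun j => decide (h ≤ heights.getD j 0))
  | [], _ => by simp [pvPop]
  | j :: rest, hp => by
    rw [List.pairwise_cons] at hp
    simp only [List.filter_cons]
    by_cases hc : heights.getD j 0 < h
    · have hd : decide (h ≤ heights.getD j 0) = false := decide_eq_false (by omega)
      rw [hd]
      simp only [Bool.false_eq_true, if_false]
      simp only [pvPop]
      rw [if_pos hc]
      exact pop_filter heights h rest hp.2
    · have hd : decide (h ≤ heights.getD j 0) = true := decide_eq_true (by omega)
      rw [hd, if_pos rfl]
      simp only [pvPop]
      rw [if_neg hc]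
      have hrest : List.filter (fun j => decide (h ≤ heights.getD j 0)) rest = rest :=
        List.filter_eq_self.mpr (fun b hb => decide_eq_true (by have := hp.1 b hb; omega))
      rw [hrest]

lemma pairwise_gsL (heights : List Int) (i : Nat) :
    (gsL heights i).Pairwise (fun a b => heights.getD a 0 ≤ heights.getD b 0) := by
  unfold gsL
  rw [List.pairwise_reverse]
  refine (List.pairwise_lt_range.filter (goodL heights i)).imp_of_mem ?_
  intro a b ha hb hab
  have hga : goodL heights i a = true := (List.mem_filter.mp ha).2
  have hbi : b < i := List.mem_range.mp (List.mem_filter.mp hb).1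
  simp only [goodL, decide_eq_true_eq] at hga
  exact hga b hbi hab

lemma pairwise_gsR (heights : List Int) (n i : Nat) :
    (gsR heights n i).Pairwise (fun a b => heights.getD a 0 ≤ heights.getD b 0) := by
  unfold gsR
  refine ((List.pairwise_lt_range').filter (goodR heights i)).imp_of_mem ?_
  intro a b ha hb hab
  have hgb : goodR heights i b = true := (List.mem_filter.mp hb).2
  have hai : i ≤ a := (List.mem_range'_1.mp (List.mem_filter.mp ha).1).1
  simp only [goodR, decide_eq_true_eq] at hgb
  exact hgb a hab hai

lemma goodL_step (heights : List Int) (i j : Nat) (hj : j < i) :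
    goodL heights (i + 1) j = (goodL heights i j && decide (heights.getD i 0 ≤ heights.getD j 0)) := by
  simp only [goodL, ← Bool.decide_and]
  apply decide_eq_decide.mpr
  constructor
  · intro hP
    exact ⟨fun m hm hjm => hP m (by omega) hjm, hP i (by omega) hj⟩
  · rintro ⟨hP, hi⟩ m hm hjm
    by_cases hmi : m = i
    · subst hmi; exact hi
    · exact hP m (by omega) hjm

lemma goodL_self (heights : List Int) (i : Nat) : goodL heights (i + 1) i = true := by
  simp only [goodL, decide_eq_true_eq]
  intro m hm him; omega

lemma goodR_step (heights : List Int) (i j : Nat) (hj : i < j) :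
    goodR heights i j = (goodR heights (i + 1) j && decide (heights.getD i 0 ≤ heights.getD j 0)) := by
  simp only [goodR, ← Bool.decide_and]
  apply decide_eq_decide.mpr
  constructor
  · intro hP
    exact ⟨fun m hm him => hP m hm (by omega), hP i hj (Nat.le_refl i)⟩
  · rintro ⟨hP, hi⟩ m hm him
    by_cases hmi : m = i
    · subst hmi; exact hi
    · exact hP m hm (by omega)

lemma goodR_self (heights : List Int) (i : Nat) : goodR heights i i = true := by
  simp only [goodR, decide_eq_true_eq]
  intro m hm him; omega

lemma push_left (heights : List Int) (i : Nat) :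
    i :: (gsL heights i).filter (fun j => decide (heights.getD i 0 ≤ heights.getD j 0)) =
      gsL heights (i + 1) := by
  unfold gsL
  rw [List.range_succ, List.filter_append]
  have h1 : List.filter (goodL heights (i + 1)) [i] = [i] := by simp [goodL_self]
  rw [h1, List.reverse_append]
  have h2 : ((List.range i).filter (goodL heights i)).reverse.filter
      (fun j => decide (heights.getD i 0 ≤ heights.getD j 0)) =
      ((List.range i).filter (goodL heights (i + 1))).reverse := by
    rw [List.filter_reverse, List.filter_filter]
    congr 1
    apply List.filter_congr
    intro a ha
    have hai : a < i := List.mem_range.mp ha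
    rw [goodL_step heights i a hai]
    exact Bool.and_comm _ _
  rw [h2]
  simp

lemma push_right (heights : List Int) (n i : Nat) (hi : i < n) :
    i :: (gsR heights n (i + 1)).filter (fun j => decide (heights.getD i 0 ≤ heights.getD j 0)) =
      gsR heights n i := by
  unfold gsR
  have hn : n - i = (n - (i + 1)) + 1 := by omega
  rw [hn, List.range'_succ, List.filter_cons]
  simp only [goodR_self, if_true]
  congr 1
  rw [List.filter_filter]
  apply List.filter_congr
  intro a ha
  have hai : i + 1 ≤ a := (List.mem_range'_1.mp ha).1
  rw [goodR_step heights i a (by omega)]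
  exact Bool.and_comm _ _

lemma head_filter_scanL (heights : List Int) (h : Int) :
    ∀ i : Nat,
      (((List.range i).filter (fun j => decide (h ≤ heights.getD j 0) && goodL heights i j)).reverse).head? =
        pvScanL heights h i
  | 0 => by simp [pvScanL]
  | i + 1 => by
    rw [List.range_succ, List.filter_append]
    by_cases hc : h ≤ heights.getD i 0
    · have h1 : List.filter (fun j => decide (h ≤ heights.getD j 0) && goodL heights (i + 1) j) [i] = [i] := by
        simp only [List.filter_cons, List.filter_nil]
        rw [decide_eq_true hc, goodL_self]
        simp
      rw [h1, List.reverse_append]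
      simp only [List.reverse_cons, List.reverse_nil, List.nil_append, List.cons_append,
        List.head?_cons]
      simp only [pvScanL]
      rw [if_pos hc]
    · have h1 : List.filter (fun j => decide (h ≤ heights.getD j 0) && goodL heights (i + 1) j) [i] = [] := by
        simp only [List.filter_cons, List.filter_nil]
        rw [decide_eq_false hc]
        simp
      rw [h1, List.append_nil]
      have hcongr : ∀ a ∈ List.range i,
          (decide (h ≤ heights.getD a 0) && goodL heights (i + 1) a) =
          (decide (h ≤ heights.getD a 0) && goodL heights i a) := by
        intro a ha
        have hai : a < i := List.mem_range.mp ha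
        by_cases hh : h ≤ heights.getD a 0
        · have hd2 : decide (heights.getD i 0 ≤ heights.getD a 0) = true := decide_eq_true (by omega)
          rw [goodL_step heights i a hai, hd2, Bool.and_true]
        · have hd2 : decide (h ≤ heights.getD a 0) = false := decide_eq_false hh
          rw [hd2, Bool.false_and, Bool.false_and]
      rw [List.filter_congr hcongr, head_filter_scanL heights h i]
      simp only [pvScanL]
      rw [if_neg hc]

lemma head_filter_scanR (heights : List Int) (h : Int) (n : Nat) :
    ∀ (k i : Nat), n - i = k →
      ((List.range' i (n - i)).filter (fun j => decide (h ≤ heights.getD j 0) && goodR heights i j)).head? =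
        pvScanR heights h n i
  | 0, i, hk => by
    have hni : ¬ i < n := by omega
    rw [hk, pvScanR.eq_def]
    simp [hni]
  | k + 1, i, hk => by
    have hin : i < n := by omega
    rw [hk, List.range'_succ]
    simp only [List.filter_cons]
    by_cases hc : h ≤ heights.getD i 0
    · rw [decide_eq_true hc, goodR_self]
      simp only [Bool.and_self]
      rw [if_pos trivial]
      simp only [List.head?_cons]
      conv_rhs => rw [pvScanR.eq_def]
      rw [dif_pos hin, if_pos hc]
    · rw [decide_eq_false hc, Bool.false_and]
      simp only [Bool.false_eq_true, if_false]
      have hcongr : ∀ a ∈ List.range' (i + 1) k,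
          (decide (h ≤ heights.getD a 0) && goodR heights i a) =
          (decide (h ≤ heights.getD a 0) && goodR heights (i + 1) a) := by
        intro a ha
        have hai : i + 1 ≤ a := (List.mem_range'_1.mp ha).1
        by_cases hh : h ≤ heights.getD a 0
        · have hd2 : decide (heights.getD i 0 ≤ heights.getD a 0) = true := decide_eq_true (by omega)
          rw [goodR_step heights i a (by omega), hd2, Bool.and_true]
        · have hd2 : decide (h ≤ heights.getD a 0) = false := decide_eq_false hh
          rw [hd2, Bool.false_and, Bool.false_and]
      rw [List.filter_congr hcongr]
      have hk2 : k = n - (i + 1) := by omega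
      rw [hk2, head_filter_scanR heights h n (n - (i + 1)) (i + 1) rfl]
      conv_rhs => rw [pvScanR.eq_def]
      rw [dif_pos hin, if_neg hc]

lemma leftAux_spec (heights : List Int) (n : Nat) :
    ∀ (k i : Nat) (acc : List (Option Nat)), n - i = k →
      pvLeftAux heights n i (gsL heights i) acc =
        acc ++ ((List.range' i (n - i)).map (fun t => leftVal heights t))
  | 0, i, acc, hk => by
    have hni : ¬ i < n := by omega
    rw [pvLeftAux.eq_def]
    simp [hni, hk]
  | k + 1, i, acc, hk => by
    have hin : i < n := by omega
    have hk' : n - (i + 1) = k := by omega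
    have hpop := pop_filter heights (heights.getD i 0) (gsL heights i) (pairwise_gsL heights i)
    have hhead : ((gsL heights i).filter (fun j => decide (heights.getD i 0 ≤ heights.getD j 0))).head? =
        pvScanL heights (heights.getD i 0) i := by
      unfold gsL
      rw [List.filter_reverse, List.filter_filter]
      exact head_filter_scanL heights (heights.getD i 0) i
    rw [pvLeftAux.eq_def, dif_pos hin]
    simp only [hpop]
    rw [hhead, push_left heights i, leftAux_spec heights n k (i + 1) _ hk']
    rw [hk, List.range'_succ]
    simp [leftVal, hk', List.append_assoc]

lemma rightAux_spec (heights : List Int) (n : Nat) :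
    ∀ (i : Nat) (acc : List (Option Nat)), i ≤ n →
      pvRightAux heights i (gsR heights n i) acc =
        ((List.range i).map (fun t => rightVal heights n t)) ++ acc
  | 0, acc, _ => by simp [pvRightAux]
  | i + 1, acc, hle => by
    have hin : i < n := by omega
    have hpop := pop_filter heights (heights.getD i 0) (gsR heights n (i + 1)) (pairwise_gsR heights n (i + 1))
    have hhead : ((gsR heights n (i + 1)).filter (fun j => decide (heights.getD i 0 ≤ heights.getD j 0))).head? =
        pvScanR heights (heights.getD i 0) n (i + 1) := by
      unfold gsR
      rw [List.filter_filter]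
      exact head_filter_scanR heights (heights.getD i 0) n (n - (i + 1)) (i + 1) rfl
    simp only [pvRightAux]
    simp only [hpop]
    rw [hhead, push_right heights n i hin, rightAux_spec heights n i _ (by omega)]
    rw [List.range_succ]
    simp [rightVal, List.append_assoc]

-- ===== VERDICT (by name: the statement is the Claim_ definition above) =====
theorem find_topographic_isolation_spec : Claim_equal_find_topographic_isolation := by
  intro n heights _dom _pre
  unfold Spec_find_topographic_isolation
  unfold find_topographic_isolation find_topographic_isolation_alt
  have hlh : pvLeftAux heights n.toNat 0 [] [] =
      (List.range n.toNat).map (fun t => leftVal heights t) := by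
    have hg : gsL heights 0 = [] := by simp [gsL]
    have h0 := leftAux_spec heights n.toNat n.toNat 0 [] (by omega)
    rw [hg] at h0
    simpa [List.range_eq_range'] using h0
  have hrh : pvRightAux heights n.toNat [] [] =
      (List.range n.toNat).map (fun t => rightVal heights n.toNat t) := by
    have hg : gsR heights n.toNat n.toNat = [] := by simp [gsR]
    have h0 := rightAux_spec heights n.toNat n.toNat [] (Nat.le_refl _)
    rw [hg] at h0
    simpa using h0
  simp only [hlh, hrh]
  apply List.map_eq_map_iff.mpr
  intro i hi
  have hilt : i < n.toNat := List.mem_range.mp hi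
  rw [PySem.List.getD_map_range (fun t => leftVal heights t) _ i none hilt,
      PySem.List.getD_map_range (fun t => rightVal heights n.toNat t) _ i none hilt]
  by_cases hc : 1 ≤ i ∧ i + 1 < n.toNat ∧ heights.getD (i - 1) 0 < heights.getD i 0 ∧
      heights.getD (i + 1) 0 < heights.getD i 0
  · rw [if_pos hc, if_pos hc]
    simp only [leftVal, rightVal]
    cases pvScanL heights (heights.getD i 0) i <;>
      cases pvScanR heights (heights.getD i 0) n.toNat (i + 1) <;>
      simp
  · rw [if_neg hc, if_neg hc]
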